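-- pv_equiv track=rewrite | github.com/Fr1tzBot/CodeStuff | Python/Wip/asciitools.py | verticalStretch
-- ===== SOURCE A (Python) =====
-- def verticalStretch(logo: str, stretchtimes: int=1) -> str:
--     outlogo = []
--     for i in logo.split("\n"):
--         outlogo.append(i)
--         outlogo.append(i)
--     logo = ""
--     for i in outlogo:
--         logo += i
--         logo += "\n"
--     if stretchtimes <= 1:
--         return logo.strip("\n")
--     else:
--         return verticalStretch(logo, stretchtimes-1)
--
-- logo = """
--                 ████████████
--                 ████████████
--         ####████████████########
--         ####████████████########
--     ####    ████████            ####
--     ####    ████████            ####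
-- ####        ████████                ####
-- ####        ████████                ####
-- ####    ████████                    ####
-- ####    ████████                    ####
--     ####████████                ####
--     ####████████                ####
--     ████████████████████████████
--     ████████████████████████████
--     ████        ████        ████████"""
-- ===== SOURCE B (Python) =====
-- def verticalStretch(logo: str, stretchtimes: int=1) -> str:
--     r = 2 ** max(stretchtimes, 1)
--     out = []
--     for line in logo.split("\n"):
--         out.extend([line] * r)
--     return "\n".join(out).strip("\n")
-- ===== Notes on version B (the rewrite author's own statement) =====
-- stated objective: simpler
-- what changed: Replaces A's recursion that re-splits and re-joins the intermediate string at every level with a single flat pass that computes the repeat factor 2**max(stretchtimes,1) in closed form and emits each line that many times.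
import Mathlib
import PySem

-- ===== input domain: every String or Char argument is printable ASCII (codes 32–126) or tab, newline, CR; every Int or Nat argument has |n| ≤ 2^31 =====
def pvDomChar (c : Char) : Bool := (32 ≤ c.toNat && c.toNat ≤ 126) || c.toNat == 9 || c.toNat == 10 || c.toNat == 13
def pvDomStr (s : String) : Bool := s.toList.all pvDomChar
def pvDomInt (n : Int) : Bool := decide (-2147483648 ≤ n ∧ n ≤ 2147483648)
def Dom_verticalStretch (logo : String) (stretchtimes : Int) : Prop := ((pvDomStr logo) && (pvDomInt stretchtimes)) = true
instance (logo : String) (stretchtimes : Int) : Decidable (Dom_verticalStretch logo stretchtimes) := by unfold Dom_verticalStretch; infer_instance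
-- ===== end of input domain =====

-- B replaces A's per-level re-split/re-join recursion by one flat pass with the
-- closed-form repeat factor 2^max(stretchtimes,1) (objective: simpler).


-- ===== PORT A =====
-- A's two loops, step for step, on the char-list side (Lean's String ops are opaque):
-- outlogo.append(i); outlogo.append(i)
def vsDouble (L : List (List Char)) : List (List Char) :=
  L.foldl (fun acc i => acc ++ [i, i]) []
-- logo += i; logo += "\n"
def vsGlue (L : List (List Char)) : List Char :=
  L.foldl (fun acc i => acc ++ i ++ ['\n']) []

def vsCore (cs : List Char) (stretchtimes : Int) : List Char :=
  let outlogo := vsDouble (PySem.Chars.splitOn cs ['\n'])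
  let cs2 := vsGlue outlogo
  if stretchtimes ≤ 1 then PySem.Chars.stripChars cs2 ['\n']
  else vsCore cs2 (stretchtimes - 1)
termination_by (stretchtimes - 1).toNat
decreasing_by omega

def verticalStretch (logo : String) (stretchtimes : Int) : String :=
  String.ofList (vsCore logo.toList stretchtimes)

-- ===== PORT B =====
-- out.extend([line] * r)
def vsRepeat (r : Nat) (L : List (List Char)) : List (List Char) :=
  L.foldl (fun acc line => acc ++ List.replicate r line) []

def verticalStretch_alt (logo : String) (stretchtimes : Int) : String :=
  let r : Nat := 2 ^ (max stretchtimes 1).toNat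
  let out := vsRepeat r (PySem.Chars.splitOn logo.toList ['\n'])
  String.ofList (PySem.Chars.stripChars (PySem.Chars.join ['\n'] out) ['\n'])

-- ===== PRECONDITION & SPEC =====
def Spec_verticalStretch (logo : String) (stretchtimes : Int) (out : String) : Prop := out = verticalStretch_alt logo stretchtimes
instance (logo : String) (stretchtimes : Int) (out : String) : Decidable (Spec_verticalStretch logo stretchtimes out) := by unfold Spec_verticalStretch; infer_instance

-- ===== CLAIM (what is proved, stated in full; the proofs are below) =====
def Claim_equal_verticalStretch : Prop := ∀ (logo : String) (stretchtimes : Int), Dom_verticalStretch logo stretchtimes → Spec_verticalStretch logo stretchtimes (verticalStretch logo stretchtimes)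

-- ===== LEMMAS AND PROOFS =====

theorem vsDouble_eq (L : List (List Char)) : vsDouble L = L.flatMap (fun i => [i, i]) :=
  Eq.symm List.flatMap_eq_foldl

theorem vsGlue_eq' (L : List (List Char)) (acc : List Char) :
    L.foldl (fun acc i => acc ++ i ++ ['\n']) acc = acc ++ L.flatMap (fun i => i ++ ['\n']) := by
  have : (fun (acc : List Char) i => acc ++ i ++ ['\n']) = fun acc i => acc ++ (i ++ ['\n']) := by
    funext a i; simp
  rw [this, PySem.List.foldl_append_eq_flatMap]

theorem go_spec (c : Char) (fuel : Nat) : ∀ (l cur : List Char) (acc : List (List Char)), l.length ≤ fuel →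
    PySem.Chars.splitOn.go [c] fuel l cur acc
      = acc.reverse ++ (l.splitOn c).modifyHead (cur.reverse ++ ·) := by
  induction fuel with
  | zero =>
    intro l cur acc h
    have : l = [] := by cases l <;> simp_all
    subst this
    simp [PySem.Chars.splitOn.go, List.splitOn]
  | succ fuel ih =>
    intro l cur acc h
    cases l with
    | nil => simp [PySem.Chars.splitOn.go, List.splitOn]
    | cons ch rest =>
      rw [PySem.Chars.splitOn.go]
      by_cases hc : ch = c
      · subst hc
        rw [if_pos (by simp [List.isPrefixOf])]
        rw [ih _ _ _ (by simpa using Nat.le_of_succ_le_succ h)]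
        simp only [List.splitOn, List.splitOnP_cons, BEq.rfl, if_pos, List.length_cons,
          List.length_nil, List.drop_succ_cons, List.drop_zero, List.reverse_cons]
        cases hsp : rest.splitOnP (· == ch) with
        | nil => exact absurd hsp (List.splitOnP_ne_nil _ _)
        | cons a t => simp
      · rw [if_neg (by simp [List.isPrefixOf, Ne.symm hc])]
        rw [ih _ _ _ (by simpa using Nat.le_of_succ_le_succ h)]
        simp only [List.splitOn, List.splitOnP_cons, beq_iff_eq, if_neg hc,
          List.modifyHead_modifyHead]
        have hfun : (fun x => (ch :: cur).reverse ++ x) = ((fun x => cur.reverse ++ x) ∘ List.cons ch) := by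
          funext x; simp
        rw [hfun]

theorem pySplitOn_eq (s : List Char) (c : Char) :
    PySem.Chars.splitOn s [c] = s.splitOn c := by
  rw [PySem.Chars.splitOn, go_spec c _ _ _ _ (by omega)]
  cases h : s.splitOn c with
  | nil => exact absurd h (List.splitOnP_ne_nil _ _)
  | cons a t => simp

theorem splitOnP_pieces {α : Type} (p : α → Bool) (xs : List α) :
    ∀ piece ∈ xs.splitOnP p, ∀ x ∈ piece, ¬ p x := by
  induction xs with
  | nil => simp
  | cons hd tl ih =>
    intro piece hp x hx
    rw [List.splitOnP_cons] at hp
    by_cases h : p hd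
    · rw [if_pos h] at hp
      rcases List.mem_cons.mp hp with h1 | h1
      · simp [h1] at hx
      · exact ih piece h1 x hx
    · rw [if_neg h] at hp
      cases hsp : tl.splitOnP p with
      | nil => exact absurd hsp (List.splitOnP_ne_nil _ _)
      | cons a t =>
        rw [hsp] at hp
        simp only [List.modifyHead_cons] at hp
        rcases List.mem_cons.mp hp with h1 | h1
        · subst h1
          rcases List.mem_cons.mp hx with h2 | h2
          · exact h2 ▸ h
          · exact ih a (by simp [hsp]) x h2
        · exact ih piece (by simp [hsp, h1]) x hx

theorem splitOn_pieces (xs : List Char) (c : Char) :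
    ∀ piece ∈ xs.splitOn c, c ∉ piece := by
  intro piece hp hc
  exact splitOnP_pieces (· == c) xs piece hp c hc (by simp)

theorem splitOn_glue (c : Char) (M : List (List Char)) (h : ∀ p ∈ M, c ∉ p) :
    (M.flatMap (fun i => i ++ [c])).splitOn c = M ++ [[]] := by
  induction M with
  | nil => simp
  | cons p M ih =>
    have hsp := List.splitOnP_first (· == c) p
      (by intro x hx hbx; exact h p (by simp) (by simpa using (beq_iff_eq.mp hbx) ▸ hx)) c (by simp)
      (M.flatMap (fun i => i ++ [c]))
    simp only [List.flatMap_cons, List.splitOn, List.append_assoc, List.singleton_append] at hsp ⊢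
    rw [hsp]
    have := ih (fun q hq => h q (by simp [hq]))
    simp only [List.splitOn] at this
    simp [this]

theorem strip_append_single (X : List Char) (c : Char) :
    PySem.Chars.stripChars (X ++ [c]) [c] = PySem.Chars.stripChars X [c] := by
  simp only [PySem.Chars.stripChars]
  rw [List.dropWhile_append]
  by_cases h : (List.dropWhile (fun ch => [c].contains ch) X).isEmpty = true
  · rw [if_pos h, List.isEmpty_iff.mp h]
    rw [show List.dropWhile (fun ch => [c].contains ch) [c] = [] from by simp]
  · rw [if_neg h]
    simp only [List.reverse_append, List.reverse_singleton, List.singleton_append]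
    rw [List.dropWhile_cons_of_pos (by simp)]

theorem strip_append_replicate (X : List Char) (c : Char) (m : Nat) :
    PySem.Chars.stripChars (X ++ List.replicate m c) [c] = PySem.Chars.stripChars X [c] := by
  induction m with
  | zero => simp
  | succ m ih =>
    rw [show List.replicate (m + 1) c = List.replicate m c ++ [c] from List.replicate_succ' ..]
    rw [← List.append_assoc, strip_append_single, ih]

theorem glue_eq_intercalate (c : Char) (M : List (List Char)) (h : M ≠ []) :
    M.flatMap (fun i => i ++ [c]) = [c].intercalate M ++ [c] := by
  induction M with
  | nil => simp at h
  | cons p M ih =>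
    cases M with
    | nil => simp [List.intercalate]
    | cons q M =>
      rw [List.flatMap_cons, ih (by simp)]
      simp only [List.intercalate, List.intersperse_cons₂, List.flatten_cons]
      simp

theorem repl_double (m : Nat) (L : List (List Char)) :
    (L.flatMap (fun i => [i, i])).flatMap (fun l => List.replicate m l)
      = L.flatMap (fun l => List.replicate (2 * m) l) := by
  induction L with
  | nil => simp
  | cons a L ih =>
    simp only [List.flatMap_cons, List.flatMap_append, ih]
    rw [show 2 * m = m + m from by omega]
    simp [← List.replicate_append_replicate, List.append_assoc]

theorem glue_replicate_nil (c : Char) (m : Nat) :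
    (List.replicate m ([] : List Char)).flatMap (fun i => i ++ [c]) = List.replicate m c := by
  induction m with
  | zero => simp
  | succ m ih => simp [List.replicate_succ, ih]

theorem vsGlue_eq (L : List (List Char)) : vsGlue L = L.flatMap (fun i => i ++ ['\n']) := by
  rw [vsGlue, vsGlue_eq']; simp

theorem vsCore_eq (stretchtimes : Int) (cs : List Char) :
    vsCore cs stretchtimes
      = PySem.Chars.stripChars
          (((cs.splitOn '\n').flatMap
              (fun l => List.replicate (2 ^ (max stretchtimes 1).toNat) l)).flatMap
            (fun i => i ++ ['\n'])) ['\n'] := by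
  rw [vsCore]
  by_cases h : stretchtimes ≤ 1
  · rw [if_pos h, vsGlue_eq, vsDouble_eq, pySplitOn_eq]
    have hm : (max stretchtimes 1).toNat = 1 := by omega
    rw [hm]
    norm_num [show (2:Nat)^1 = 2 from rfl, show ∀ l : List Char, List.replicate 2 l = [l, l] from fun l => rfl]
  · rw [if_neg h]
    rw [vsCore_eq (stretchtimes - 1)]
    rw [vsGlue_eq, vsDouble_eq, pySplitOn_eq]
    set L := cs.splitOn '\n' with hL
    set M := L.flatMap (fun i => [i, i]) with hM
    have hpieces : ∀ p ∈ M, '\n' ∉ p := by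
      intro p hp
      rcases List.mem_flatMap.mp hp with ⟨i, hi, hpi⟩
      have : p = i := by rcases List.mem_cons.mp hpi with h1 | h1; · exact h1
                         · simpa using h1
      exact this ▸ splitOn_pieces cs '\n' i hi
    rw [splitOn_glue '\n' M hpieces]
    have hmax : (max (stretchtimes - 1) 1).toNat = (stretchtimes - 1).toNat := by omega
    rw [hmax]
    set m : Nat := 2 ^ (stretchtimes - 1).toNat with hm
    rw [List.flatMap_append]
    have h1 : ([([] : List Char)].flatMap fun l => List.replicate m l) = List.replicate m [] := by
      simp
    rw [h1, List.flatMap_append, glue_replicate_nil, strip_append_replicate]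
    rw [repl_double]
    have h2 : 2 * m = 2 ^ (max stretchtimes 1).toNat := by
      rw [hm, ← pow_succ']
      congr 1
      omega
    rw [h2]
termination_by (stretchtimes - 1).toNat
decreasing_by omega

theorem vsRepeat_eq (r : Nat) (L : List (List Char)) :
    vsRepeat r L = L.flatMap (fun line => List.replicate r line) :=
  Eq.symm List.flatMap_eq_foldl

theorem vsFinal (logo : String) (st : Int) :
    String.ofList (vsCore logo.toList st)
      = String.ofList (PySem.Chars.stripChars
          (PySem.Chars.join ['\n'] (vsRepeat (2 ^ (max st 1).toNat) (PySem.Chars.splitOn logo.toList ['\n']))) ['\n']) := by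
  rw [vsCore_eq, vsRepeat_eq, pySplitOn_eq]
  congr 1
  have hL : logo.toList.splitOn '\n' ≠ [] := List.splitOnP_ne_nil _ _
  have hK : (logo.toList.splitOn '\n').flatMap (fun l => List.replicate (2 ^ (max st 1).toNat) l) ≠ [] := by
    cases hc : logo.toList.splitOn '\n' with
    | nil => exact absurd hc hL
    | cons a t =>
      have hr : 2 ^ (max st 1).toNat ≠ 0 := by positivity
      simp [List.flatMap_cons]
  rw [glue_eq_intercalate '\n' _ hK, strip_append_single, PySem.Chars.join]

-- ===== VERDICT (by name: the statement is the Claim_ definition above) =====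
theorem verticalStretch_spec : Claim_equal_verticalStretch := by
  intro logo st _
  unfold Spec_verticalStretch verticalStretch verticalStretch_alt
  exact vsFinal logo st
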